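-- pv_equiv track=rewrite | github.com/ZomkeyYe/Python-Learning | test/test41.py | zom
-- ===== SOURCE A (Python) =====
-- def zom(str1):
--     dic = {0:'N',1:'E',2:'S',3:'W'}
--     count = 0
--     for i in range(len(str1)):
--         if str1[i] == 'L':
--             count-=1
--         elif str1[i] == 'R':
--             count+=1
--     count=(count%4)
--     return(dic[count])
-- ===== SOURCE B (Python) =====
-- def zom(str1):
--     # Maintain the facing unit vector instead of a turn counter.
--     x, y = 0, 1  # North
--     for ch in str1:
--         if ch == 'R':
--             x, y = y, -x
--         elif ch == 'L':
--             x, y = -y, x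
--     return {(0, 1): 'N', (1, 0): 'E', (0, -1): 'S', (-1, 0): 'W'}[(x, y)]
-- ===== Notes on version B (the rewrite author's own statement) =====
-- stated objective: idiomatic
-- what changed: B simulates the heading as a rotating unit vector (x,y) updated per turn and reads the final letter off a vector->letter table, instead of A's signed turn counter reduced mod 4 and indexed into a dict; B also iterates the characters directly instead of indexing by position.
import Mathlib
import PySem

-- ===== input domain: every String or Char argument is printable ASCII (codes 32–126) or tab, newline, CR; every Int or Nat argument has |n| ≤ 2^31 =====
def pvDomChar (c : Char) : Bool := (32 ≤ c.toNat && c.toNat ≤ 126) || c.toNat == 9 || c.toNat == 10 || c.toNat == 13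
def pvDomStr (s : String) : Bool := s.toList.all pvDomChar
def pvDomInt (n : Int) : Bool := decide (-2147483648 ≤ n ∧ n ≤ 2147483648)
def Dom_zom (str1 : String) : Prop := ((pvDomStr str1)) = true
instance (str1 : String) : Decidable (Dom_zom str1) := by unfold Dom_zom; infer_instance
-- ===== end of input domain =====

-- B replaces A's signed turn counter (reduced mod 4, then indexed into a dict) by a
-- rotating unit heading vector looked up in a vector->letter table (idiomatic alternative).

-- ===== PORT A =====
-- literal port of A: count turns over range(len(str1)), reduce mod 4, look up in {0:'N',...}.
-- The final '.getD ""' only realises the dict lookup's value: count % 4 is always a key 0..3,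
-- so the KeyError branch (none) is unreachable and the port is exact.
def zom (str1 : String) : String :=
  let dic : PySem.Dict Int String :=
    PySem.Dict.ofList [(0, "N"), (1, "E"), (2, "S"), (3, "W")]
  let count : Int :=
    (PySem.List.pyRange 0 (PySem.Str.len str1) 1).foldl
      (fun c i =>
        let ch := PySem.List.pyGetD str1.toList i ' '
        if ch = 'L' then c - 1 else if ch = 'R' then c + 1 else c) 0
  let count := PySem.Int.mod count 4
  (dic.get? count).getD ""

-- ===== PORT B =====
-- literal port of B: rotate the heading vector per turn, then look the vector up in the
-- vector->letter dict; the vector is always one of the four keys, so '.getD ""' is exact.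
def zom_alt (str1 : String) : String :=
  let v : Int × Int :=
    str1.toList.foldl
      (fun v ch =>
        if ch = 'R' then (v.2, -v.1) else if ch = 'L' then (-v.2, v.1) else v) (0, 1)
  let tbl : PySem.Dict (Int × Int) String :=
    PySem.Dict.ofList [((0, 1), "N"), ((1, 0), "E"), ((0, -1), "S"), ((-1, 0), "W")]
  (tbl.get? v).getD ""

-- ===== PRECONDITION & SPEC =====
def Spec_zom (str1 : String) (out : String) : Prop := out = zom_alt str1
instance (str1 : String) (out : String) : Decidable (Spec_zom str1 out) := by unfold Spec_zom; infer_instance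

-- ===== CLAIM (what is proved, stated in full; the proofs are below) =====
def Claim_equal_zom : Prop := ∀ (str1 : String), Dom_zom str1 → Spec_zom str1 (zom str1)

-- ===== LEMMAS AND PROOFS =====

-- the heading vector corresponding to a turn count
def pvVec (c : Int) : Int × Int :=
  if c % 4 = 0 then (0, 1)
  else if c % 4 = 1 then (1, 0)
  else if c % 4 = 2 then (0, -1)
  else (-1, 0)

lemma pvVec_succ (c : Int) : pvVec (c + 1) = ((pvVec c).2, -(pvVec c).1) := by
  have h : c % 4 = 0 ∨ c % 4 = 1 ∨ c % 4 = 2 ∨ c % 4 = 3 := by omega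
  rcases h with h | h | h | h <;>
    simp [pvVec, h, show (c + 1) % 4 = (c % 4 + 1) % 4 by omega]

lemma pvVec_pred (c : Int) : pvVec (c - 1) = (-(pvVec c).2, (pvVec c).1) := by
  have h : c % 4 = 0 ∨ c % 4 = 1 ∨ c % 4 = 2 ∨ c % 4 = 3 := by omega
  rcases h with h | h | h | h <;>
    simp [pvVec, h, show (c - 1) % 4 = (c % 4 + 3) % 4 by omega]

-- loop invariant: B's vector fold tracks pvVec of A's counter fold
lemma pv_fold_eq (l : List Char) (c : Int) :
    l.foldl (fun (v : Int × Int) ch =>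
        if ch = 'R' then (v.2, -v.1) else if ch = 'L' then (-v.2, v.1) else v) (pvVec c)
      = pvVec (l.foldl (fun c ch => if ch = 'L' then c - 1 else if ch = 'R' then c + 1 else c) c) := by
  induction l generalizing c with
  | nil => rfl
  | cons ch t ih =>
    by_cases hL : ch = 'L'
    · simp only [List.foldl_cons, hL, ← pvVec_pred]
      · exact ih (c - 1)
    · by_cases hR : ch = 'R'
      · simp only [List.foldl_cons, hR, ← pvVec_succ]
        exact ih (c + 1)
      · simp only [List.foldl_cons, if_neg hL, if_neg hR]
        exact ih c

lemma pv_fold_zero (l : List Char) :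
    l.foldl (fun (v : Int × Int) ch =>
        if ch = 'R' then (v.2, -v.1) else if ch = 'L' then (-v.2, v.1) else v) (0, 1)
      = pvVec (l.foldl (fun c ch => if ch = 'L' then c - 1 else if ch = 'R' then c + 1 else c) 0) :=
  pv_fold_eq l 0

-- the two final table lookups agree for every counter value
lemma pv_lookup_eq (c : Int) :
    ((PySem.Dict.ofList [(0, "N"), (1, "E"), (2, "S"), (3, "W")] :
        PySem.Dict Int String).get? (PySem.Int.mod c 4)).getD ""
      = ((PySem.Dict.ofList [((0, 1), "N"), ((1, 0), "E"), ((0, -1), "S"), ((-1, 0), "W")] :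
        PySem.Dict (Int × Int) String).get? (pvVec c)).getD "" := by
  rw [PySem.Int.mod_eq_emod_of_pos (by norm_num : (0:Int) < 4)]
  have h : c % 4 = 0 ∨ c % 4 = 1 ∨ c % 4 = 2 ∨ c % 4 = 3 := by omega
  rcases h with h | h | h | h <;> simp [pvVec, h] <;> decide

-- ===== VERDICT (by name: the statement is the Claim_ definition above) =====
theorem zom_spec : Claim_equal_zom := by
  intro str1 _
  show zom str1 = zom_alt str1
  unfold zom zom_alt
  rw [show PySem.Str.len str1 = ((str1.toList.length : Int)) by simp [PySem.Str.len_eq],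
    PySem.List.foldl_pyRange_zero_pyGetD' str1.toList ' '
      (fun c ch => if ch = 'L' then c - 1 else if ch = 'R' then c + 1 else c) 0]
  simp only [pv_fold_zero, pv_lookup_eq]
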